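-- pv_equiv track=rewrite | github.com/PeteTaylor89/auxein-insights | backend/utils/el_scale.py | suggest_current_stages_by_month
-- ===== SOURCE A (Python) =====
-- EL_PHASES = {
--     "dormant": {
--         "name": "Dormant",
--         "description": "Winter dormancy period",
--         "stages": ["EL-1"],
--         "typical_months": ["Jun", "Jul", "Aug"],  # Southern hemisphere
--         "order": 1
--     },
--     "shoot_development": {
--         "name": "Shoot and Inflorescence Development",
--         "description": "Bud break through shoot and leaf development",
--         "stages": ["EL-2", "EL-3", "EL-4", "EL-7", "EL-9", "EL-11", "EL-12",
--                    "EL-13", "EL-14", "EL-15", "EL-16", "EL-17", "EL-18"],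
--         "typical_months": ["Sep", "Oct", "Nov"],
--         "order": 2
--     },
--     "flowering": {
--         "name": "Flowering",
--         "description": "Flower cap fall and pollination period",
--         "stages": ["EL-19", "EL-20", "EL-21", "EL-23", "EL-25", "EL-26"],
--         "typical_months": ["Nov", "Dec"],
--         "order": 3
--     },
--     "berry_development": {
--         "name": "Berry Development",
--         "description": "Fruit set through berry growth",
--         "stages": ["EL-27", "EL-29", "EL-31", "EL-32", "EL-33", "EL-34"],
--         "typical_months": ["Dec", "Jan"],
--         "order": 4
--     },
--     "berry_ripening": {
--         "name": "Berry Ripening",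
--         "description": "Veraison through harvest and post-harvest",
--         "stages": ["EL-35", "EL-36", "EL-37", "EL-38", "EL-39", "EL-41"],
--         "typical_months": ["Feb", "Mar", "Apr", "May"],
--         "order": 5
--     },
--     "senescence": {
--         "name": "Senescence",
--         "description": "Leaf fall and return to dormancy",
--         "stages": ["EL-43", "EL-47"],
--         "typical_months": ["May", "Jun"],
--         "order": 6
--     }
-- }
--
-- def suggest_current_stages_by_month(month: int) -> list:
--     """Suggest likely EL stages based on current month (Southern Hemisphere)"""
--     month_names = [
--         "", "Jan", "Feb", "Mar", "Apr", "May", "Jun",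
--         "Jul", "Aug", "Sep", "Oct", "Nov", "Dec"
--     ]
--
--     if month < 1 or month > 12:
--         return []
--
--     current_month = month_names[month]
--
--     suggested_phases = [
--         phase_key for phase_key, phase_info in EL_PHASES.items()
--         if current_month in phase_info["typical_months"]
--     ]
--
--     suggested_stages = []
--     for phase in suggested_phases:
--         suggested_stages.extend(EL_PHASES[phase]["stages"])
--
--     return suggested_stages
-- ===== SOURCE B (Python) =====
-- EL_PHASES = {
--     "dormant": {
--         "name": "Dormant",
--         "description": "Winter dormancy period",
--         "stages": ["EL-1"],
--         "typical_months": ["Jun", "Jul", "Aug"],  # Southern hemisphere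
--         "order": 1
--     },
--     "shoot_development": {
--         "name": "Shoot and Inflorescence Development",
--         "description": "Bud break through shoot and leaf development",
--         "stages": ["EL-2", "EL-3", "EL-4", "EL-7", "EL-9", "EL-11", "EL-12",
--                    "EL-13", "EL-14", "EL-15", "EL-16", "EL-17", "EL-18"],
--         "typical_months": ["Sep", "Oct", "Nov"],
--         "order": 2
--     },
--     "flowering": {
--         "name": "Flowering",
--         "description": "Flower cap fall and pollination period",
--         "stages": ["EL-19", "EL-20", "EL-21", "EL-23", "EL-25", "EL-26"],
--         "typical_months": ["Nov", "Dec"],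
--         "order": 3
--     },
--     "berry_development": {
--         "name": "Berry Development",
--         "description": "Fruit set through berry growth",
--         "stages": ["EL-27", "EL-29", "EL-31", "EL-32", "EL-33", "EL-34"],
--         "typical_months": ["Dec", "Jan"],
--         "order": 4
--     },
--     "berry_ripening": {
--         "name": "Berry Ripening",
--         "description": "Veraison through harvest and post-harvest",
--         "stages": ["EL-35", "EL-36", "EL-37", "EL-38", "EL-39", "EL-41"],
--         "typical_months": ["Feb", "Mar", "Apr", "May"],
--         "order": 5
--     },
--     "senescence": {
--         "name": "Senescence",
--         "description": "Leaf fall and return to dormancy",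
--         "stages": ["EL-43", "EL-47"],
--         "typical_months": ["May", "Jun"],
--         "order": 6
--     }
-- }
--
-- # Precomputed at module load: month number (1-12) -> concatenated stage list,
-- # built by iterating EL_PHASES once in order.
-- _MONTH_NUM = {m: i for i, m in enumerate(
--     ["Jan", "Feb", "Mar", "Apr", "May", "Jun",
--      "Jul", "Aug", "Sep", "Oct", "Nov", "Dec"], start=1)}
-- _STAGES_BY_MONTH = {}
-- for _info in EL_PHASES.values():
--     for _m in _info["typical_months"]:
--         _STAGES_BY_MONTH.setdefault(_MONTH_NUM[_m], []).extend(_info["stages"])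
--
-- def suggest_current_stages_by_month(month: int) -> list:
--     """Suggest likely EL stages based on current month (Southern Hemisphere)"""
--     return list(_STAGES_BY_MONTH.get(month, []))
-- ===== Notes on version B (the rewrite author's own statement) =====
-- stated objective: idiomatic
-- what changed: B precomputes once, at module load, a dict mapping month number to its concatenated stage list (one pass over EL_PHASES), so the function body is a single guard-free dict lookup returning a fresh copy, instead of A's per-call name lookup + filter over phases + concatenation loop.
import Mathlib
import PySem

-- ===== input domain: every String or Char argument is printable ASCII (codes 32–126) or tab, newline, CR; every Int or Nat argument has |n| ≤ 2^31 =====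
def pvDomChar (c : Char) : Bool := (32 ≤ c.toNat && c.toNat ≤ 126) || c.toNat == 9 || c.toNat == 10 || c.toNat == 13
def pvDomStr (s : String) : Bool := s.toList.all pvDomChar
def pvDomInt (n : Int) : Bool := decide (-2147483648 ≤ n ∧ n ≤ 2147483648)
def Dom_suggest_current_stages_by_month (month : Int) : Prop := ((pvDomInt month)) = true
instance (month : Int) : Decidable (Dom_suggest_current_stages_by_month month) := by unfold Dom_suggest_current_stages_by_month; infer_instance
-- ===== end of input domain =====

-- B replaces A's per-call filter-then-concatenate scans over EL_PHASES by a table of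
-- month → stages precomputed once at module load, so the call is a single dict lookup (idiomatic).

-- ===== PORT A =====
-- EL_PHASES, keeping the fields A uses: (phase_key, (stages, typical_months))
def pvELPhases : List (String × List String × List String) := [
  ("dormant", (["EL-1"], ["Jun", "Jul", "Aug"])),
  ("shoot_development", (["EL-2", "EL-3", "EL-4", "EL-7", "EL-9", "EL-11", "EL-12",
    "EL-13", "EL-14", "EL-15", "EL-16", "EL-17", "EL-18"], ["Sep", "Oct", "Nov"])),
  ("flowering", (["EL-19", "EL-20", "EL-21", "EL-23", "EL-25", "EL-26"], ["Nov", "Dec"])),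
  ("berry_development", (["EL-27", "EL-29", "EL-31", "EL-32", "EL-33", "EL-34"], ["Dec", "Jan"])),
  ("berry_ripening", (["EL-35", "EL-36", "EL-37", "EL-38", "EL-39", "EL-41"], ["Feb", "Mar", "Apr", "May"])),
  ("senescence", (["EL-43", "EL-47"], ["May", "Jun"]))]

-- EL_PHASES[phase]["stages"] lookup
def pvPhaseStages (phase : String) : List String :=
  ((pvELPhases.find? (fun p => p.1 == phase)).map (·.2.1)).getD []

def suggest_current_stages_by_month (month : Int) : List String :=
  let month_names : List String :=
    ["", "Jan", "Feb", "Mar", "Apr", "May", "Jun",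
     "Jul", "Aug", "Sep", "Oct", "Nov", "Dec"]
  if month < 1 ∨ month > 12 then []
  else
    match PySem.List.pyGet? month_names month with
    | none => []   -- unreachable: 1 ≤ month ≤ 12 is in range
    | some current_month =>
      let suggested_phases :=
        (pvELPhases.filter (fun p => p.2.2.contains current_month)).map (·.1)
      suggested_phases.foldl (fun acc phase => acc ++ pvPhaseStages phase) []

-- ===== PORT B =====
-- month name -> month number (built once)
def pvMonthNum : PySem.Dict String Int :=
  PySem.Dict.ofList ((["Jan", "Feb", "Mar", "Apr", "May", "Jun",
    "Jul", "Aug", "Sep", "Oct", "Nov", "Dec"]|> PySem.List.enumerate).map (fun p => (p.2, p.1 + 1)))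

-- _STAGES_BY_MONTH: built once by one pass over EL_PHASES (setdefault + extend)
def pvStagesByMonth : PySem.Dict Int (List String) :=
  pvELPhases.foldl (fun d info =>
    info.2.2.foldl (fun d m =>
      let k := (pvMonthNum.get? m).getD 0
      d.insert k ((d.getD k []) ++ info.2.1)) d) PySem.Dict.empty

def suggest_current_stages_by_month_alt (month : Int) : List String :=
  pvStagesByMonth.getD month []

-- ===== PRECONDITION & SPEC =====
def Spec_suggest_current_stages_by_month (month : Int) (out : List String) : Prop := out = suggest_current_stages_by_month_alt month
instance (month : Int) (out : List String) : Decidable (Spec_suggest_current_stages_by_month month out) := by unfold Spec_suggest_current_stages_by_month; infer_instance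

-- ===== CLAIM (what is proved, stated in full; the proofs are below) =====
def Claim_equal_suggest_current_stages_by_month : Prop := ∀ (month : Int), Dom_suggest_current_stages_by_month month → Spec_suggest_current_stages_by_month month (suggest_current_stages_by_month month)

-- ===== LEMMAS AND PROOFS =====

-- Outside 1..12 the precomputed table has no entry, so B also yields [].
lemma alt_out_of_range (month : Int) (h : month < 1 ∨ month > 12) :
    suggest_current_stages_by_month_alt month = [] := by
  have hk : pvStagesByMonth.keys = [6, 7, 8, 9, 10, 11, 12, 1, 2, 3, 4, 5] := by decide
  have hc : pvStagesByMonth.contains month = false := by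
    rw [PySem.Dict.contains_eq_decide_mem_keys, hk]
    simp; omega
  exact PySem.Dict.getD_of_not_contains _ _ hc

-- ===== VERDICT (by name: the statement is the Claim_ definition above) =====
theorem suggest_current_stages_by_month_spec : Claim_equal_suggest_current_stages_by_month := by
  intro month _
  unfold Spec_suggest_current_stages_by_month
  by_cases h : 1 ≤ month ∧ month ≤ 12
  · obtain ⟨hl, hr⟩ := h
    interval_cases month <;> decide
  · have h' : month < 1 ∨ month > 12 := by omega
    rw [alt_out_of_range month h']
    unfold suggest_current_stages_by_month
    simp only []
    rw [if_pos (by omega)]
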